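-- pv_equiv track=rewrite | github.com/Ahituv-lab/Asymmetron | venv/functions.py | get_distance_orientations
-- ===== SOURCE A (Python) =====
-- def get_distance_orientations(DistanceL,Strand1L,Strand2L,window_min,window_max):
--     same_strandL_distance=[];opposite_strandL_distance=[];
--     divergentL_distance=[];convergentL_distance=[];
--     for index in range(len(Strand1L)):
--         if (DistanceL[index]< window_max and DistanceL[index] >= window_min):
--             sign1 = Strand1L[index]
--             sign2 = Strand2L[index]
--             if sign1 in ["+", "-"] and sign2 in ["+", "-"]:
--                 if sign1 == sign2:
--                      same_strandL_distance.append(DistanceL[index])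
--                 else:
--                      opposite_strandL_distance.append(DistanceL[index])
--
--                      if sign1 == "+" and sign2 == "-":
--                          convergentL_distance.append(DistanceL[index])
--                      elif sign1 == "-" and sign2 == "+":
--                          divergentL_distance.append(DistanceL[index])
--
--     return (same_strandL_distance,opposite_strandL_distance,divergentL_distance,convergentL_distance)
-- ===== SOURCE B (Python) =====
-- def get_distance_orientations(DistanceL, Strand1L, Strand2L, window_min, window_max):
--     # one filtering pass, then four independent selections over the filtered triples
--     kept = []
--     for index in range(len(Strand1L)):
--         d = DistanceL[index]
--         if window_min <= d < window_max:
--             kept.append((d, Strand1L[index], Strand2L[index]))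
--     valid = ("+", "-")
--     same = [d for (d, s1, s2) in kept if s1 in valid and s2 in valid and s1 == s2]
--     opposite = [d for (d, s1, s2) in kept if s1 in valid and s2 in valid and s1 != s2]
--     convergent = [d for (d, s1, s2) in kept if s1 == "+" and s2 == "-"]
--     divergent = [d for (d, s1, s2) in kept if s1 == "-" and s2 == "+"]
--     return (same, opposite, divergent, convergent)
-- ===== Notes on version B (the rewrite author's own statement) =====
-- stated objective: simpler
-- what changed: A's single fused loop with four interleaved append branches is replaced by one windowing filter pass that builds a list of (distance, sign1, sign2) triples, followed by four independent comprehensions that each select one category from that list.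
import Mathlib
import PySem

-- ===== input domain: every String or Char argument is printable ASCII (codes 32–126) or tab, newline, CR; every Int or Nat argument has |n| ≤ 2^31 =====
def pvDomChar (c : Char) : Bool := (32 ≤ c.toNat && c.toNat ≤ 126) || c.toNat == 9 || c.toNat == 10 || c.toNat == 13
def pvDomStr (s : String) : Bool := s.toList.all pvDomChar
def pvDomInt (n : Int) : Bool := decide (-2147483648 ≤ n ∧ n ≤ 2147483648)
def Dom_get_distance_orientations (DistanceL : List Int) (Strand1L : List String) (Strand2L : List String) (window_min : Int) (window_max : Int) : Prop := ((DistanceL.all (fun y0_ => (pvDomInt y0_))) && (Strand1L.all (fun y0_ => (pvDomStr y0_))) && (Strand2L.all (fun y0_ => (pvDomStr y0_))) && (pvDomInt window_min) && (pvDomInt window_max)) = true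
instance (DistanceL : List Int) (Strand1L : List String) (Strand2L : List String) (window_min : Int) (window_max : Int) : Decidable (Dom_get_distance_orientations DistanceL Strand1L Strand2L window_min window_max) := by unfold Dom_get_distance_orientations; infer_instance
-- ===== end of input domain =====

-- B replaces A's single fused loop (four interleaved append branches) by one windowing
-- filter pass building (distance, sign1, sign2) triples plus four independent selections
-- over that filtered list (objective: simpler decomposition; same O(n) cost).

-- ===== PORT A =====
-- loop body of A's fused for-loop (acc = the four result lists being appended to)
def pvStepA (DistanceL : List Int) (Strand1L : List String) (Strand2L : List String)
    (window_min window_max : Int)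
    (acc : List Int × List Int × List Int × List Int) (index : Nat) :
    List Int × List Int × List Int × List Int :=
  let d := (PySem.List.pyGet? DistanceL (index : Int)).getD 0
  if d < window_max ∧ window_min ≤ d then
    let sign1 := (PySem.List.pyGet? Strand1L (index : Int)).getD ""
    let sign2 := (PySem.List.pyGet? Strand2L (index : Int)).getD ""
    if (sign1 = "+" ∨ sign1 = "-") ∧ (sign2 = "+" ∨ sign2 = "-") then
      if sign1 = sign2 then (acc.1 ++ [d], acc.2.1, acc.2.2.1, acc.2.2.2)
      else
        let opp := acc.2.1 ++ [d]
        if sign1 = "+" ∧ sign2 = "-" then (acc.1, opp, acc.2.2.1, acc.2.2.2 ++ [d])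
        else if sign1 = "-" ∧ sign2 = "+" then (acc.1, opp, acc.2.2.1 ++ [d], acc.2.2.2)
        else (acc.1, opp, acc.2.2.1, acc.2.2.2)
    else acc
  else acc

def get_distance_orientations (DistanceL : List Int) (Strand1L : List String) (Strand2L : List String) (window_min : Int) (window_max : Int) : List Int × List Int × List Int × List Int :=
  (List.range Strand1L.length).foldl
    (pvStepA DistanceL Strand1L Strand2L window_min window_max) ([], [], [], [])

-- ===== PORT B =====
-- filtering pass of Source B: keep (d, sign1, sign2) for indices whose distance is in window
def pvKeptStep (DistanceL : List Int) (Strand1L : List String) (Strand2L : List String)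
    (window_min window_max : Int)
    (acc : List (Int × String × String)) (index : Nat) : List (Int × String × String) :=
  let d := (PySem.List.pyGet? DistanceL (index : Int)).getD 0
  if window_min ≤ d ∧ d < window_max then
    acc ++ [(d, (PySem.List.pyGet? Strand1L (index : Int)).getD "",
                (PySem.List.pyGet? Strand2L (index : Int)).getD "")]
  else acc

def pvValid (s : String) : Bool := s == "+" || s == "-"

-- the four comprehensions of Source B over the kept triples
def pvSame (K : List (Int × String × String)) : List Int :=
  (K.filter (fun t => pvValid t.2.1 && pvValid t.2.2 && (t.2.1 == t.2.2))).map (·.1)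
def pvOpp (K : List (Int × String × String)) : List Int :=
  (K.filter (fun t => pvValid t.2.1 && pvValid t.2.2 && !(t.2.1 == t.2.2))).map (·.1)
def pvConv (K : List (Int × String × String)) : List Int :=
  (K.filter (fun t => (t.2.1 == "+") && (t.2.2 == "-"))).map (·.1)
def pvDivg (K : List (Int × String × String)) : List Int :=
  (K.filter (fun t => (t.2.1 == "-") && (t.2.2 == "+"))).map (·.1)

def get_distance_orientations_alt (DistanceL : List Int) (Strand1L : List String) (Strand2L : List String) (window_min : Int) (window_max : Int) : List Int × List Int × List Int × List Int :=
  let kept := (List.range Strand1L.length).foldl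
    (pvKeptStep DistanceL Strand1L Strand2L window_min window_max) []
  (pvSame kept, pvOpp kept, pvDivg kept, pvConv kept)

-- ===== PRECONDITION & SPEC =====
-- Pre_ excludes exactly the inputs on which the Python raises IndexError: an index of
-- range(len(Strand1L)) out of range for DistanceL, or (for an in-window distance) for Strand2L.
def Pre_get_distance_orientations (DistanceL : List Int) (Strand1L : List String) (Strand2L : List String) (window_min : Int) (window_max : Int) : Prop :=
  ∀ i : Nat, i < Strand1L.length →
    i < DistanceL.length ∧
      ((window_min ≤ DistanceL.getD i 0 ∧ DistanceL.getD i 0 < window_max) → i < Strand2L.length)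
instance (DistanceL : List Int) (Strand1L : List String) (Strand2L : List String) (window_min : Int) (window_max : Int) : Decidable (Pre_get_distance_orientations DistanceL Strand1L Strand2L window_min window_max) := by unfold Pre_get_distance_orientations; infer_instance

def pvWitness_get_distance_orientations : List Int × List String × List String × Int × Int :=
  ([1, 2], ["+", "-"], ["-", "-"], 0, 5)

def Spec_get_distance_orientations (DistanceL : List Int) (Strand1L : List String) (Strand2L : List String) (window_min : Int) (window_max : Int) (out : List Int × List Int × List Int × List Int) : Prop := out = get_distance_orientations_alt DistanceL Strand1L Strand2L window_min window_max
instance (DistanceL : List Int) (Strand1L : List String) (Strand2L : List String) (window_min : Int) (window_max : Int) (out : List Int × List Int × List Int × List Int) : Decidable (Spec_get_distance_orientations DistanceL Strand1L Strand2L window_min window_max out) := by unfold Spec_get_distance_orientations; infer_instance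

-- ===== CLAIM (what is proved, stated in full; the proofs are below) =====
def Claim_equal_get_distance_orientations : Prop := ∀ (DistanceL : List Int) (Strand1L : List String) (Strand2L : List String) (window_min : Int) (window_max : Int), Dom_get_distance_orientations DistanceL Strand1L Strand2L window_min window_max → Pre_get_distance_orientations DistanceL Strand1L Strand2L window_min window_max → Spec_get_distance_orientations DistanceL Strand1L Strand2L window_min window_max (get_distance_orientations DistanceL Strand1L Strand2L window_min window_max)

-- ===== LEMMAS AND PROOFS =====

-- kept-fold accumulator law: the filter pass appends on the right
theorem pvKept_acc (D : List Int) (S1 S2 : List String) (wmin wmax : Int)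
    (L : List Nat) (acc : List (Int × String × String)) :
    L.foldl (pvKeptStep D S1 S2 wmin wmax) acc
      = acc ++ L.foldl (pvKeptStep D S1 S2 wmin wmax) [] := by
  induction L generalizing acc with
  | nil => simp
  | cons i L ih =>
    simp only [List.foldl_cons]
    rw [ih, ih (pvKeptStep D S1 S2 wmin wmax [] i)]
    unfold pvKeptStep
    by_cases h : wmin ≤ D[i]?.getD 0 ∧ D[i]?.getD 0 < wmax <;> simp [h]

theorem pvSame_cons (t : Int × String × String) (K : List (Int × String × String)) :
    pvSame (t :: K) = if pvValid t.2.1 && pvValid t.2.2 && (t.2.1 == t.2.2)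
      then t.1 :: pvSame K else pvSame K := by
  unfold pvSame; by_cases h : (pvValid t.2.1 && pvValid t.2.2 && (t.2.1 == t.2.2)) = true <;>
    simp [List.filter_cons, h]

theorem pvOpp_cons (t : Int × String × String) (K : List (Int × String × String)) :
    pvOpp (t :: K) = if pvValid t.2.1 && pvValid t.2.2 && !(t.2.1 == t.2.2)
      then t.1 :: pvOpp K else pvOpp K := by
  unfold pvOpp; by_cases h : (pvValid t.2.1 && pvValid t.2.2 && !(t.2.1 == t.2.2)) = true <;>
    simp [List.filter_cons, h]

theorem pvConv_cons (t : Int × String × String) (K : List (Int × String × String)) :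
    pvConv (t :: K) = if (t.2.1 == "+") && (t.2.2 == "-")
      then t.1 :: pvConv K else pvConv K := by
  unfold pvConv; by_cases h : ((t.2.1 == "+") && (t.2.2 == "-")) = true <;>
    simp [List.filter_cons, h]

theorem pvDivg_cons (t : Int × String × String) (K : List (Int × String × String)) :
    pvDivg (t :: K) = if (t.2.1 == "-") && (t.2.2 == "+")
      then t.1 :: pvDivg K else pvDivg K := by
  unfold pvDivg; by_cases h : ((t.2.1 == "-") && (t.2.2 == "+")) = true <;>
    simp [List.filter_cons, h]

-- main invariant: A's fused fold over any index list equals B's filter pass + selections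
theorem pvMain (D : List Int) (S1 S2 : List String) (wmin wmax : Int) (L : List Nat)
    (s o dv cv : List Int) :
    L.foldl (pvStepA D S1 S2 wmin wmax) (s, o, dv, cv)
      = (s ++ pvSame (L.foldl (pvKeptStep D S1 S2 wmin wmax) []),
         o ++ pvOpp (L.foldl (pvKeptStep D S1 S2 wmin wmax) []),
         dv ++ pvDivg (L.foldl (pvKeptStep D S1 S2 wmin wmax) []),
         cv ++ pvConv (L.foldl (pvKeptStep D S1 S2 wmin wmax) [])) := by
  induction L generalizing s o dv cv with
  | nil => simp [pvSame, pvOpp, pvConv, pvDivg]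
  | cons i L ih =>
    simp only [List.foldl_cons]
    rw [pvKept_acc D S1 S2 wmin wmax L (pvKeptStep D S1 S2 wmin wmax [] i)]
    set d := (PySem.List.pyGet? D (i : Int)).getD 0 with hd
    set s1 := (PySem.List.pyGet? S1 (i : Int)).getD "" with hs1
    set s2 := (PySem.List.pyGet? S2 (i : Int)).getD "" with hs2
    by_cases hw : d < wmax ∧ wmin ≤ d
    · have hw' : wmin ≤ d ∧ d < wmax := ⟨hw.2, hw.1⟩
      have hk : pvKeptStep D S1 S2 wmin wmax [] i = [(d, s1, s2)] := by
        unfold pvKeptStep; rw [← hd, ← hs1, ← hs2]; simp [hw']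
      rw [hk]
      by_cases h1p : s1 = "+" <;> by_cases h1m : s1 = "-" <;>
        by_cases h2p : s2 = "+" <;> by_cases h2m : s2 = "-" <;>
        first
          | (exact absurd (h1p ▸ h1m) (by decide))
          | (exact absurd (h2p ▸ h2m) (by decide))
          | (have hA : pvStepA D S1 S2 wmin wmax (s, o, dv, cv) i
                = (s, o, dv, cv) := by
              unfold pvStepA; rw [← hd, ← hs1, ← hs2]
              simp [hw, h1p, h1m, h2p, h2m]
             rw [hA, ih]
             simp [pvSame_cons, pvOpp_cons, pvConv_cons, pvDivg_cons,
                   pvValid, h1p, h1m, h2p, h2m])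
          | (have hA : pvStepA D S1 S2 wmin wmax (s, o, dv, cv) i
                = (s ++ [d], o, dv, cv) := by
              unfold pvStepA; rw [← hd, ← hs1, ← hs2]
              simp [hw, h1p, h1m, h2p, h2m]
             rw [hA, ih]
             simp [pvSame_cons, pvOpp_cons, pvConv_cons, pvDivg_cons,
                   pvValid, h1p, h1m, h2p, h2m])
          | (have hA : pvStepA D S1 S2 wmin wmax (s, o, dv, cv) i
                = (s, o ++ [d], dv, cv ++ [d]) := by
              unfold pvStepA; rw [← hd, ← hs1, ← hs2]
              simp [hw, h1p, h1m, h2p, h2m]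
             rw [hA, ih]
             simp [pvSame_cons, pvOpp_cons, pvConv_cons, pvDivg_cons,
                   pvValid, h1p, h1m, h2p, h2m])
          | (have hA : pvStepA D S1 S2 wmin wmax (s, o, dv, cv) i
                = (s, o ++ [d], dv ++ [d], cv) := by
              unfold pvStepA; rw [← hd, ← hs1, ← hs2]
              simp [hw, h1p, h1m, h2p, h2m]
             rw [hA, ih]
             simp [pvSame_cons, pvOpp_cons, pvConv_cons, pvDivg_cons,
                   pvValid, h1p, h1m, h2p, h2m])
    · have hw' : ¬ (wmin ≤ d ∧ d < wmax) := fun h => hw ⟨h.2, h.1⟩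
      have hk : pvKeptStep D S1 S2 wmin wmax [] i = [] := by
        unfold pvKeptStep; rw [← hd]; simp [hw']
      have hA : pvStepA D S1 S2 wmin wmax (s, o, dv, cv) i = (s, o, dv, cv) := by
        unfold pvStepA; rw [← hd]; simp [hw]
      rw [hk, hA, ih]; simp

-- ===== VERDICT (by name: the statement is the Claim_ definition above) =====
theorem get_distance_orientations_spec : Claim_equal_get_distance_orientations := by
  intro DistanceL Strand1L Strand2L window_min window_max _ _
  unfold Spec_get_distance_orientations get_distance_orientations get_distance_orientations_alt
  rw [pvMain]
  simp
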